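-- pv_equiv track=rewrite | github.com/kathiresan916/mypythonfiles | forloops/exercise17.py | count_words_without_vowels
-- ===== SOURCE A (Python) =====
-- def count_words_without_vowels(string):
--   """Counts the number of words in a string that do not contain any vowels.
--
--   Args:
--     string: The string to be counted.
--
--   Returns:
--     The number of words in the string that do not contain any vowels.
--   """
--   words = string.split()
--   count = 0
--
--   for word in words:
--     vowels = "aeiou"
--     for char in word:
--       if char.lower() in vowels:
--         break
--     else:
--       count += 1
--
--   return count
-- ===== SOURCE B (Python) =====
-- def count_words_without_vowels(string):
--   """Counts the number of words in a string that do not contain any vowels.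
--
--   Single pass over the characters: a small state machine tracks whether we
--   are inside a word and whether the current word has seen a vowel; a word is
--   counted at the whitespace (or end) that terminates it.  No split(), no
--   per-word inner loop.
--   """
--   count = 0
--   in_word = False
--   has_vowel = False
--   for ch in string:
--     if ch.isspace():
--       if in_word and not has_vowel:
--         count += 1
--       in_word = False
--       has_vowel = False
--     else:
--       in_word = True
--       if ch.lower() in "aeiou":
--         has_vowel = True
--   if in_word and not has_vowel:
--     count += 1
--   return count
-- ===== Notes on version B (the rewrite author's own statement) =====
-- stated objective: alternative
-- what changed: Replaced split-into-words plus a per-word character loop with a single character-level finite-state scan of the whole string (in_word/has_vowel flags), counting a word at the whitespace or end that terminates it; no split() and no inner loop.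
import Mathlib
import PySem

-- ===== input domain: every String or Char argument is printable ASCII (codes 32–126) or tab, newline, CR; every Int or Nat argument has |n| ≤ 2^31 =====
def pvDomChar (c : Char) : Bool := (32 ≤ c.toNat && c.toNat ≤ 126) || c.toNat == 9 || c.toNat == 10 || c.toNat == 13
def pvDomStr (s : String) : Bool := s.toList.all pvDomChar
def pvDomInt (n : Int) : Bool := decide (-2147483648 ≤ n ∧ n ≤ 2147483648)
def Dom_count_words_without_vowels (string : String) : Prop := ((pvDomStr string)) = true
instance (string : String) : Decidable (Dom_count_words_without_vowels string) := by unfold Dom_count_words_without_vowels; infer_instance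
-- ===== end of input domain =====

-- header: B is a single-pass character state machine (no split(), no inner per-word loop); return values agree on all inputs.

-- ===== PORT A =====
-- 'ch.lower() in "aeiou"' for a one-char string is exact char membership
def pvIsVowel (c : Char) : Bool := List.elem (PySem.Chars.lowerChar c) "aeiou".toList

-- inner 'for char in word: if char.lower() in vowels: break / else:' — true iff the loop broke
def pvABroke : List Char → Bool
  | [] => false
  | c :: rest => if pvIsVowel c then true else pvABroke rest

def count_words_without_vowels (string : String) : Int :=
  let words := PySem.Str.split₀ string
  words.foldl (fun count word => if pvABroke word.toList then count else count + 1) 0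

-- ===== PORT B =====
-- the for-loop of Source B: state = (in_word, has_vowel, count)
def pvScan : List Char → Bool → Bool → Int → Int
  | [], inW, hasV, cnt => if inW && !hasV then cnt + 1 else cnt
  | c :: rest, inW, hasV, cnt =>
      if PySem.Chars.isspace c then
        pvScan rest false false (if inW && !hasV then cnt + 1 else cnt)
      else
        pvScan rest true (hasV || pvIsVowel c) cnt

def count_words_without_vowels_alt (string : String) : Int :=
  pvScan string.toList false false 0

-- ===== PRECONDITION & SPEC =====
def Spec_count_words_without_vowels (string : String) (out : Int) : Prop := out = count_words_without_vowels_alt string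
instance (string : String) (out : Int) : Decidable (Spec_count_words_without_vowels string out) := by unfold Spec_count_words_without_vowels; infer_instance

-- ===== CLAIM (what is proved, stated in full; the proofs are below) =====
def Claim_equal_count_words_without_vowels : Prop := ∀ (string : String), Dom_count_words_without_vowels string → Spec_count_words_without_vowels string (count_words_without_vowels string)

-- ===== LEMMAS AND PROOFS =====
-- a word has no vowel
def pvNoV (w : List Char) : Bool := !(w.any pvIsVowel)

-- A's inner loop breaks iff some character is a vowel
theorem pvABroke_eq_any (l : List Char) : pvABroke l = l.any pvIsVowel := by
  induction l with
  | nil => rfl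
  | cons c rest ih =>
      simp only [pvABroke, List.any_cons]
      cases hc : pvIsVowel c <;> simp [*]

-- A's counting fold equals the length of the filtered word list
theorem pvFold_eq (ws : List String) (c : Int) :
    ws.foldl (fun count word => if pvABroke word.toList then count else count + 1) c =
      c + ((ws.filter (fun w => pvNoV w.toList)).length : Int) := by
  induction ws generalizing c with
  | nil => simp
  | cons w rest ih =>
      simp only [List.foldl_cons, List.filter_cons]
      cases hA : pvABroke w.toList
      · have hb : pvNoV w.toList = true := by
          simp [pvNoV, ← pvABroke_eq_any, hA]
        rw [ih, hb]
        simp only [if_true, List.length_cons]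
        push_cast
        ring
      · have hb : pvNoV w.toList = false := by
          simp [pvNoV, ← pvABroke_eq_any, hA]
        rw [ih, hb]
        simp

-- split₀.go distributes over its accumulator
theorem pvGo_acc (l : List Char) (cur : List Char) (acc : List (List Char)) :
    PySem.Chars.split₀.go l cur acc = acc.reverse ++ PySem.Chars.split₀.go l cur [] := by
  induction l generalizing cur acc with
  | nil =>
      simp only [PySem.Chars.split₀.go]
      split_ifs <;> simp
  | cons c rest ih =>
      simp only [PySem.Chars.split₀.go]
      split_ifs with hs h
      · exact ih [] acc
      · rw [ih [] (cur.reverse :: acc), ih [] [cur.reverse]]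
        simp
      · exact ih (c :: cur) acc

-- B's state machine counts the no-vowel words produced by split₀.go
theorem pvScan_eq (l : List Char) :
    ∀ (cur : List Char) (cnt : Int),
      pvScan l (!cur.isEmpty) (cur.any pvIsVowel) cnt =
        cnt + (((PySem.Chars.split₀.go l cur []).filter pvNoV).length : Int) := by
  induction l with
  | nil =>
      intro cur cnt
      cases cur with
      | nil => simp [pvScan, PySem.Chars.split₀.go]
      | cons d cs =>
          have hw : pvNoV ((d :: cs).reverse) = !((d :: cs).any pvIsVowel) := by
            simp only [pvNoV, List.any_reverse]
          simp only [pvScan, PySem.Chars.split₀.go, List.isEmpty_cons, Bool.not_false,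
            Bool.true_and]
          cases hv : (d :: cs).any pvIsVowel
          · have hw' : pvNoV ((d :: cs).reverse) = true := by rw [hw, hv]; rfl
            rw [if_pos (by simp [hv])]
            simp only [Bool.false_eq_true, if_false, List.reverse_singleton]
            rw [List.filter_cons, if_pos hw']
            simp
          · have hw' : pvNoV ((d :: cs).reverse) = false := by rw [hw, hv]; rfl
            rw [if_neg (by simp [hv])]
            simp only [Bool.false_eq_true, if_false, List.reverse_singleton]
            rw [List.filter_cons, if_neg (by simp [← List.reverse_cons, hw'])]
            simp
  | cons c rest ih =>
      intro cur cnt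
      have ihnil : ∀ cnt' : Int,
          pvScan rest false false cnt' =
            cnt' + (((PySem.Chars.split₀.go rest [] []).filter pvNoV).length : Int) := by
        intro cnt'; simpa using ih [] cnt'
      cases cur with
      | nil =>
          simp only [pvScan, PySem.Chars.split₀.go, List.isEmpty_nil, Bool.not_true,
            Bool.false_and, Bool.not_false]
          by_cases hs : PySem.Chars.isspace c = true
          · rw [if_pos hs, if_pos hs]
            simpa using ihnil cnt
          · rw [if_neg hs, if_neg hs]
            have := ih [c] cnt
            simpa [Bool.or_comm] using this
      | cons d cs =>
          simp only [pvScan, PySem.Chars.split₀.go, List.isEmpty_cons, Bool.not_false,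
            Bool.true_and]
          by_cases hs : PySem.Chars.isspace c = true
          · rw [if_pos hs, if_pos hs]
            have hw : pvNoV ((d :: cs).reverse) = !((d :: cs).any pvIsVowel) := by
              simp only [pvNoV, List.any_reverse]
            rw [pvGo_acc rest [] [(d :: cs).reverse], ihnil]
            cases hv : (d :: cs).any pvIsVowel
            · have hw' : pvNoV ((d :: cs).reverse) = true := by rw [hw, hv]; rfl
              rw [if_pos (by simp [hv])]
              simp only [Bool.false_eq_true, if_false, List.reverse_singleton,
                List.singleton_append]
              rw [List.filter_cons, if_pos hw']
              simp only [List.length_cons]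
              push_cast
              ring
            · have hw' : pvNoV ((d :: cs).reverse) = false := by rw [hw, hv]; rfl
              rw [if_neg (by simp [hv])]
              simp only [Bool.false_eq_true, if_false, List.reverse_singleton,
                List.singleton_append]
              rw [List.filter_cons, if_neg (by simp [← List.reverse_cons, hw'])]
          · rw [if_neg hs, if_neg hs]
            have := ih (c :: d :: cs) cnt
            simp only [List.isEmpty_cons, Bool.not_false, List.any_cons] at this
            rw [← this]
            congr 1
            simp only [List.any_cons]
            exact Bool.or_comm _ _

-- filtering the word strings = filtering the underlying char lists
theorem pvFilter_map (ws : List (List Char)) :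
    ((ws.map String.ofList).filter (fun w => pvNoV w.toList)).length =
      (ws.filter pvNoV).length := by
  induction ws with
  | nil => rfl
  | cons w rest ih =>
      simp only [List.map_cons, List.filter_cons, String.toList_ofList]
      cases h : pvNoV w <;> simp [h, ih]

-- ===== VERDICT (by name: the statement is the Claim_ definition above) =====
theorem count_words_without_vowels_spec : Claim_equal_count_words_without_vowels := by
  intro s _
  unfold Spec_count_words_without_vowels count_words_without_vowels count_words_without_vowels_alt
  simp only [PySem.Str.split₀]
  rw [pvFold_eq, pvFilter_map]
  have := pvScan_eq s.toList [] 0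
  simp only [List.isEmpty_nil, Bool.not_true, List.any_nil] at this
  rw [this]
  rfl
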